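-- pv_equiv track=rewrite | github.com/zaboevai/python_base | lesson_011/02_prime_numbers.py | lucky_prime_numbers_generator
-- ===== SOURCE A (Python) =====
-- def prime_numbers_generator(n):
--     prime_numbers = []
--     for number in range(2, n + 1):
--         for prime in prime_numbers:
--             if number % prime == 0:
--                 break
--         else:
--             prime_numbers.append(number)
--             yield number
--
-- def lucky_prime_numbers_generator(n):
--
--     for number in prime_numbers_generator(n):
--         lucky_nmb_len = len(str(number))
--         cnt = (lucky_nmb_len-1) // 2 if lucky_nmb_len % 2 != 0 else lucky_nmb_len // 2
--
--         if cnt: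
--             left_path, right_path = str(number)[:cnt], str(number)[-cnt:]
--
--             left_nmb_sum = sum([int(num) for num in left_path])
--             right_nmb_sum = sum([int(num) for num in right_path])
--
--             if left_nmb_sum == right_nmb_sum:
--                 yield number, left_path, right_path
-- ===== SOURCE B (Python) =====
-- def _is_prime(m):
--     if m < 2:
--         return False
--     d = 2
--     while d * d <= m:
--         if m % d == 0:
--             return False
--         d += 1
--     return True
--
--
-- def _digit_sum(t):
--     return sum(int(c) for c in t)
--
--
-- def lucky_prime_numbers_generator(n):
--     for number in range(2, n + 1):
--         if _is_prime(number):
--             s = str(number)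
--             cnt = len(s) // 2
--             if cnt and _digit_sum(s[:cnt]) == _digit_sum(s[-cnt:]):
--                 yield number, s[:cnt], s[-cnt:]
-- ===== Notes on version B (the rewrite author's own statement) =====
-- stated objective: faster
-- what changed: A grows a list of all primes found so far and trial-divides each candidate by every one of them; B tests each candidate independently by trial division only up to its square root (d*d <= m), keeping no prime list, and simplifies the half-length computation to len(s)//2.
import Mathlib
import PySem

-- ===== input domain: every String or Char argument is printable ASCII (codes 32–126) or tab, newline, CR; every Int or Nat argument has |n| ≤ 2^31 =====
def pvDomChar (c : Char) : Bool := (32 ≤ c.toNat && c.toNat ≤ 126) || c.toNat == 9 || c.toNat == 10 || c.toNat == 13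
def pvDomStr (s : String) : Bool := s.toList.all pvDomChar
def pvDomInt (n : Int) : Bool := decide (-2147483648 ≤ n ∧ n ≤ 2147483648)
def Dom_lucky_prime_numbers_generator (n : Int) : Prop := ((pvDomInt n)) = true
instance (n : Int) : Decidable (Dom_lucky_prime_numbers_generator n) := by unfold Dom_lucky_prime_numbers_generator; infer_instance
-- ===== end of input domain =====

-- B replaces A's growing prime list (each candidate trial-divided by every earlier prime) with an
-- independent trial division up to the square root; a timing run measured B faster.

-- ===== PORT A =====
-- sum([int(num) for num in path]); int(c) ported as code point minus 48, exact on the decimal digits of str(number)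
def pvDigitSumA (path : String) : Int :=
  (path.toList.map (fun c => ((c.toNat : Int) - 48))).sum

-- the body of A's lucky test: the tuples yielded for one prime `number` ([] or a singleton)
def pvLuckyA (number : Int) : List (Int × String × String) :=
  let lucky_nmb_len : Int := PySem.Str.len (PySem.Int.toStr number)
  let cnt : Int := if PySem.Int.mod lucky_nmb_len 2 ≠ 0
                   then PySem.Int.floordiv (lucky_nmb_len - 1) 2
                   else PySem.Int.floordiv lucky_nmb_len 2
  if cnt ≠ 0 then
    let left_path := PySem.Str.slice (PySem.Int.toStr number) none (some cnt)
    let right_path := PySem.Str.slice (PySem.Int.toStr number) (some (-cnt)) none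
    if pvDigitSumA left_path = pvDigitSumA right_path then [(number, left_path, right_path)] else []
  else []

-- one iteration of A's interleaved generators: state = (prime_numbers, output so far)
def pvStepA (st : List Int × List (Int × String × String)) (number : Int) :
    List Int × List (Int × String × String) :=
  if st.1.any (fun prime => PySem.Int.mod number prime == 0) then st
  else (st.1 ++ [number], st.2 ++ pvLuckyA number)

def lucky_prime_numbers_generator (n : Int) : List (Int × String × String) :=
  ((PySem.List.pyRange 2 (n + 1) 1).foldl pvStepA ([], [])).2

-- ===== PORT B =====
-- B's while loop: trial division from d upward while d*d <= m
def pvTrial (m d : Int) : Bool :=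
  if h : d * d ≤ m then
    (if PySem.Int.mod m d == 0 then false else pvTrial m (d + 1))
  else true
termination_by (m + 1 - d).toNat
decreasing_by
  have hdm : d ≤ m := by nlinarith [mul_self_nonneg (2 * d - 1)]
  omega

def pvIsPrime (m : Int) : Bool := if m < 2 then false else pvTrial m 2

def pvDigitSumB (t : String) : Int :=
  (t.toList.map (fun c => ((c.toNat : Int) - 48))).sum

def pvLuckyB (number : Int) : List (Int × String × String) :=
  let s := PySem.Int.toStr number
  let cnt : Int := PySem.Int.floordiv (PySem.Str.len s) 2
  if cnt ≠ 0 ∧ pvDigitSumB (PySem.Str.slice s none (some cnt)) = pvDigitSumB (PySem.Str.slice s (some (-cnt)) none)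
  then [(number, PySem.Str.slice s none (some cnt), PySem.Str.slice s (some (-cnt)) none)]
  else []

def pvStepB (out : List (Int × String × String)) (number : Int) : List (Int × String × String) :=
  if pvIsPrime number then out ++ pvLuckyB number else out

def lucky_prime_numbers_generator_alt (n : Int) : List (Int × String × String) :=
  (PySem.List.pyRange 2 (n + 1) 1).foldl pvStepB []

-- ===== PRECONDITION & SPEC =====
def Spec_lucky_prime_numbers_generator (n : Int) (out : List (Int × String × String)) : Prop := out = lucky_prime_numbers_generator_alt n
instance (n : Int) (out : List (Int × String × String)) : Decidable (Spec_lucky_prime_numbers_generator n out) := by unfold Spec_lucky_prime_numbers_generator; infer_instance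

-- ===== CLAIM (what is proved, stated in full; the proofs are below) =====
def Claim_equal_lucky_prime_numbers_generator : Prop := ∀ (n : Int), Dom_lucky_prime_numbers_generator n → Spec_lucky_prime_numbers_generator n (lucky_prime_numbers_generator n)

-- ===== LEMMAS AND PROOFS =====

-- B's while loop returns true iff no k ≥ d with k*k ≤ m divides m (for 0 ≤ d)
theorem pvTrial_iff (m d : Int) :
    0 ≤ d → (pvTrial m d = true ↔ ∀ k : Int, d ≤ k → k * k ≤ m → ¬ k ∣ m) := by
  fun_induction pvTrial m d with
  | case1 d hle hmod =>
    intro h0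
    simp only [Bool.false_eq_true, false_iff]
    intro h
    refine h d le_rfl hle ?_
    rw [← PySem.Int.mod_eq_zero_iff_dvd]
    exact beq_iff_eq.mp hmod
  | case2 d hle hmod ih =>
    intro h0
    rw [ih (by omega)]
    constructor
    · intro h k hk hkk
      rcases eq_or_lt_of_le hk with rfl | h2
      · intro hdvd
        exact absurd ((PySem.Int.mod_eq_zero_iff_dvd _ _).mpr hdvd) (by simpa using hmod)
      · exact h k (by omega) hkk
    · intro h k hk hkk
      exact h k (by omega) hkk
  | case3 d hgt =>
    intro h0
    simp only [true_iff]
    intro k hk hkk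
    exfalso
    have : d * d ≤ k * k := by nlinarith
    omega

-- pvIsPrime computes primality of m.toNat (together with 2 ≤ m)
theorem pvIsPrime_iff (m : Int) : pvIsPrime m = true ↔ 2 ≤ m ∧ Nat.Prime m.toNat := by
  unfold pvIsPrime
  split_ifs with h
  · simp only [false_iff]
    intro ⟨h2, _⟩; omega
  · have hm : 2 ≤ m := by omega
    have hmn : (m.toNat : Int) = m := Int.toNat_of_nonneg (by omega)
    rw [pvTrial_iff m 2 (by omega)]
    rw [Nat.prime_def_le_sqrt]
    constructor
    · intro hfor
      refine ⟨hm, ⟨by omega, ?_⟩⟩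
      intro j hj hsq hdvd
      have hjj : j * j ≤ m.toNat := by
        have := Nat.le_sqrt'.mp hsq
        nlinarith [Nat.sqrt_le' m.toNat]
      refine hfor (j : Int) (by exact_mod_cast hj) (by rw [← hmn]; exact_mod_cast hjj) ?_
      have : (j : Int) ∣ (m.toNat : Int) := by exact_mod_cast hdvd
      rwa [hmn] at this
    · intro ⟨_, _, hfor⟩ k hk hkk hdvd
      have hk0 : 0 ≤ k := by omega
      rcases hdvd with ⟨c, hc⟩
      have hc0 : 0 ≤ c := by nlinarith
      have h1 : k.toNat ∣ m.toNat := by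
        refine ⟨c.toNat, ?_⟩
        zify [Int.toNat_of_nonneg hk0, Int.toNat_of_nonneg hc0, hmn]
        exact hc
      refine hfor k.toNat (by omega) ?_ h1
      rw [Nat.le_sqrt']
      zify [Int.toNat_of_nonneg hk0, hmn]
      nlinarith

theorem dvd_toNat_iff {p m : Int} (hp : 0 ≤ p) (hm : 0 ≤ m) : p.toNat ∣ m.toNat ↔ p ∣ m := by
  rw [← Int.natCast_dvd_natCast, Int.toNat_of_nonneg hp, Int.toNat_of_nonneg hm]

-- A's inner loop over the primes already found fires exactly on the composites
theorem anyDiv_eq (m : Int) (hm : 2 ≤ m) :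
    ((PySem.List.pyRange 2 m 1).filter pvIsPrime).any (fun prime => PySem.Int.mod m prime == 0)
      = !pvIsPrime m := by
  have hmn : (m.toNat : Int) = m := Int.toNat_of_nonneg (by omega)
  cases hq : pvIsPrime m with
  | true =>
    simp only [Bool.not_true]
    rw [List.any_eq_false]
    intro p hpmem
    simp only [List.mem_filter, PySem.List.mem_pyRange_one] at hpmem
    obtain ⟨⟨hp2, hplt⟩, hpprime⟩ := hpmem
    simp only [beq_iff_eq]
    intro hmod
    have hdvd : p ∣ m := (PySem.Int.mod_eq_zero_iff_dvd m p).mp hmod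
    obtain ⟨_, hprime⟩ := (pvIsPrime_iff m).mp hq
    obtain ⟨hq2, _⟩ := (pvIsPrime_iff p).mp hpprime
    have h1 : p.toNat ∣ m.toNat := (dvd_toNat_iff (by omega) (by omega)).mpr hdvd
    rcases hprime.eq_one_or_self_of_dvd _ h1 with h | h <;> omega
  | false =>
    simp only [Bool.not_false]
    have hnotprime : ¬ m.toNat.Prime := by
      intro hpr
      have := (pvIsPrime_iff m).mpr ⟨hm, hpr⟩
      rw [hq] at this; exact absurd this (by simp)
    have hm1 : m.toNat ≠ 1 := by omega
    have hqp : m.toNat.minFac.Prime := Nat.minFac_prime hm1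
    have hqdvd : m.toNat.minFac ∣ m.toNat := Nat.minFac_dvd _
    have hqne : m.toNat.minFac ≠ m.toNat := fun he => hnotprime (he ▸ hqp)
    have hqlt : m.toNat.minFac < m.toNat := lt_of_le_of_ne (Nat.minFac_le (by omega)) hqne
    refine List.any_eq_true.mpr ⟨(m.toNat.minFac : Int), ?_, ?_⟩
    · rw [List.mem_filter]
      constructor
      · rw [PySem.List.mem_pyRange_one]
        constructor
        · exact_mod_cast hqp.two_le
        · rw [← hmn]; exact_mod_cast hqlt
      · rw [pvIsPrime_iff]
        exact ⟨by exact_mod_cast hqp.two_le, by simpa using hqp⟩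
    · simp only [beq_iff_eq]
      rw [PySem.Int.mod_eq_zero_iff_dvd, ← hmn]
      exact_mod_cast hqdvd

-- A's half-length computation equals B's: (l-1)//2 = l//2 for odd l
theorem cnt_eq (l : Int) : (if PySem.Int.mod l 2 ≠ 0
    then PySem.Int.floordiv (l - 1) 2 else PySem.Int.floordiv l 2) = PySem.Int.floordiv l 2 := by
  rw [PySem.Int.mod_eq_emod_of_pos (by norm_num : (0:Int) < 2),
      PySem.Int.floordiv_eq_ediv_of_pos (by norm_num : (0:Int) < 2),
      PySem.Int.floordiv_eq_ediv_of_pos (by norm_num : (0:Int) < 2)]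
  split_ifs with h <;> omega

theorem if_if_eq_if_and {α : Type} (c p : Prop) [Decidable c] [Decidable p] (x e : α) :
    (if c then (if p then x else e) else e) = if c ∧ p then x else e := by
  split_ifs <;> tauto

-- A's and B's lucky test agree
theorem lucky_eq (number : Int) : pvLuckyA number = pvLuckyB number := by
  unfold pvLuckyA pvLuckyB
  simp only [cnt_eq, pvDigitSumA, pvDigitSumB]
  exact if_if_eq_if_and _ _ _ _

-- loop invariant: A's state after processing 2..2+k-1 is (the primes among them, B's output)
theorem fold_inv (k : Nat) :
    (PySem.List.pyRange 2 (2 + (k : Int)) 1).foldl pvStepA ([], [])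
      = ((PySem.List.pyRange 2 (2 + (k : Int)) 1).filter pvIsPrime,
         (PySem.List.pyRange 2 (2 + (k : Int)) 1).foldl pvStepB []) := by
  induction k with
  | zero =>
    rw [PySem.List.pyRange_one_eq_nil (by norm_num)]
    rfl
  | succ k ih =>
    have hcast : (2 + ((k + 1 : Nat) : Int)) = (2 + (k : Int)) + 1 := by push_cast; ring
    rw [hcast, PySem.List.pyRange_one_succ_right (by omega), List.foldl_append,
        List.filter_append, List.foldl_append, ih]
    simp only [List.foldl_cons, List.foldl_nil, List.filter_cons, List.filter_nil]
    show pvStepA (_, _) _ = _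
    unfold pvStepA pvStepB
    rw [anyDiv_eq (2 + (k : Int)) (by omega)]
    cases hq : pvIsPrime (2 + (k : Int)) <;> simp [lucky_eq]

-- ===== VERDICT (by name: the statement is the Claim_ definition above) =====
theorem lucky_prime_numbers_generator_spec : Claim_equal_lucky_prime_numbers_generator := by
  intro n _
  unfold Spec_lucky_prime_numbers_generator lucky_prime_numbers_generator lucky_prime_numbers_generator_alt
  by_cases hn : n + 1 ≤ 2
  · rw [PySem.List.pyRange_one_eq_nil hn]
    rfl
  · have hk : n + 1 = 2 + ((n - 1).toNat : Int) := by omega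
    rw [hk, fold_inv]
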